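-- pv_equiv track=rewrite | github.com/qvandermiers/ln2t_tools | ln2t_tools/import_data/meg.py | extract_bids_entities
-- ===== SOURCE A (Python) =====
-- from typing import List, Optional, Dict, Any, Tuple, Set
--
-- def extract_bids_entities(filename: str) -> Dict[str, Optional[str]]:
--     """Extract all BIDS entities from a filename.
--
--     Parses BIDS entities including sub, ses, task, run, acq, rec, split, proc, dir, ce
--     and other standard entities. Handles both standard and extended entities.
--
--     Parameters
--     ----------
--     filename : str
--         BIDS filename (without path)
--
--     Returns
--     -------
--     Dict[str, Optional[str]]
--         Dictionary with extracted entities (all values default to None)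
--     """
--     entities: Dict[str, Optional[str]] = {
--         'sub': None,
--         'ses': None,
--         'task': None,
--         'acq': None,
--         'ce': None,
--         'rec': None,
--         'dir': None,
--         'run': None,
--         'mod': None,
--         'echo': None,
--         'flip': None,
--         'inv': None,
--         'mt': None,
--         'part': None,
--         'proc': None,
--         'hemi': None,
--         'space': None,
--         'split': None,
--         'desc': None,
--     }
--
--     # Remove extension(s) - handle cases like .fif, .json, .nii.gz
--     name = filename
--     for ext in ['.nii.gz', '.tsv.gz', '.json', '.nii', '.tsv', '.fif', '.pos', '.dat']:
--         if name.lower().endswith(ext):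
--             name = name[:-len(ext)]
--             break
--
--     # Split by underscore
--     parts = name.split('_')
--
--     for part in parts:
--         if '-' not in part:
--             continue
--
--         entity_name, entity_value = part.split('-', 1)
--         if entity_name in entities and entity_value:
--             entities[entity_name] = entity_value
--
--     return entities
-- ===== SOURCE B (Python) =====
-- _BIDS_KEYS = ('sub', 'ses', 'task', 'acq', 'ce', 'rec', 'dir', 'run', 'mod', 'echo',
--               'flip', 'inv', 'mt', 'part', 'proc', 'hemi', 'space', 'split', 'desc')
-- _EXTS = ('.nii.gz', '.tsv.gz', '.json', '.nii', '.tsv', '.fif', '.pos', '.dat')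
--
--
-- def extract_bids_entities(filename: str):
--     name = filename
--     ext = next((e for e in _EXTS if name.lower().endswith(e)), None)
--     if ext is not None:
--         name = name[:-len(ext)]
--     pairs = []
--     for part in name.split('_'):
--         if '-' in part:
--             n, v = part.split('-', 1)
--             if v:
--                 pairs.append((n, v))
--     return {k: next((v for n, v in reversed(pairs) if n == k), None) for k in _BIDS_KEYS}
-- ===== Notes on version B (the rewrite author's own statement) =====
-- stated objective: alternative
-- what changed: Instead of mutating a preinitialized dict while looping over tokens, B collects the (name, value) pairs once and then builds the result dict by a per-key comprehension taking the last matching pair, with no membership test during the scan.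
import Mathlib
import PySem

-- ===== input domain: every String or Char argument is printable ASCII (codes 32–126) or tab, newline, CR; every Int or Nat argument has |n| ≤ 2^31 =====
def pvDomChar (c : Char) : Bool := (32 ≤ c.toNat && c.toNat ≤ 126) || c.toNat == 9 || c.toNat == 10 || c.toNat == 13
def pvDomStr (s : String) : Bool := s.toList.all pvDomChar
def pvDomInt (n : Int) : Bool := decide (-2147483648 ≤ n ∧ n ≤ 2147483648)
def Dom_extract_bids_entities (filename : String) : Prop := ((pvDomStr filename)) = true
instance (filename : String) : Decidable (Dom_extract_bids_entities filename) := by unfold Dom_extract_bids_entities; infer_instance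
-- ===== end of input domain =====

-- B replaces A's dict-mutation loop by collecting all (name, value) pairs once and
-- building the dict per key from the last matching pair (objective: alternative).

-- ===== PORT A =====
def pvExtsA : List String := [".nii.gz", ".tsv.gz", ".json", ".nii", ".tsv", ".fif", ".pos", ".dat"]

-- the 'for ext in …: if …: name = name[:-len(ext)]; break' loop
def pvStripExtA : List String → String → String
  | [], name => name
  | ext :: rest, name =>
    if PySem.Str.endswith (PySem.Str.lower name) ext then
      PySem.Str.slice name none (some (-(PySem.Str.len ext : Int)))
    else pvStripExtA rest name

def extract_bids_entities (filename : String) : List (String × Option String) :=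
  let entities : PySem.Dict String (Option String) := PySem.Dict.ofList
    [("sub", none), ("ses", none), ("task", none), ("acq", none), ("ce", none),
     ("rec", none), ("dir", none), ("run", none), ("mod", none), ("echo", none),
     ("flip", none), ("inv", none), ("mt", none), ("part", none), ("proc", none),
     ("hemi", none), ("space", none), ("split", none), ("desc", none)]
  let name := pvStripExtA pvExtsA filename
  let parts := (PySem.Str.split? name "_").getD []
  let entities := parts.foldl (fun d part =>
    if PySem.Str.isIn "-" part = false then d
    else
      match (PySem.Str.splitMax? part "-" 1).getD [] with
      | n :: v :: _ => if d.contains n && v != "" then d.insert n (some v) else d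
      | _ => d) entities
  entities.items

-- ===== PORT B =====
def pvKeysB : List String :=
  ["sub", "ses", "task", "acq", "ce", "rec", "dir", "run", "mod", "echo",
   "flip", "inv", "mt", "part", "proc", "hemi", "space", "split", "desc"]

-- the "ext = next((e for e in _EXTS if name.lower().endswith(e)), None)" lookup
def pvStripExtB (name : String) : String :=
  match [".nii.gz", ".tsv.gz", ".json", ".nii", ".tsv", ".fif", ".pos",
         ".dat"].find? (fun e => PySem.Str.endswith (PySem.Str.lower name) e) with
  | some ext => PySem.Str.slice name none (some (-(PySem.Str.len ext : Int)))
  | none => name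

def extract_bids_entities_alt (filename : String) : List (String × Option String) :=
  let name := pvStripExtB filename
  let pairs : List (String × String) := ((PySem.Str.split? name "_").getD []).foldl
    (fun acc part =>
      if PySem.Str.isIn "-" part then
        match (PySem.Str.splitMax? part "-" 1).getD [] with
        | [] => acc
        | [_] => acc
        | n :: v :: _ => if v != "" then acc ++ [(n, v)] else acc
      else acc) []
  pvKeysB.map (fun k => (k, (pairs.reverse.find? (fun p => p.1 == k)).map Prod.snd))

-- ===== PRECONDITION & SPEC =====
def Spec_extract_bids_entities (filename : String) (out : List (String × Option String)) : Prop := out = extract_bids_entities_alt filename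
instance (filename : String) (out : List (String × Option String)) : Decidable (Spec_extract_bids_entities filename out) := by unfold Spec_extract_bids_entities; infer_instance

-- ===== CLAIM (what is proved, stated in full; the proofs are below) =====
def Claim_equal_extract_bids_entities : Prop := ∀ (filename : String), Dom_extract_bids_entities filename → Spec_extract_bids_entities filename (extract_bids_entities filename)

-- ===== LEMMAS AND PROOFS =====

theorem stripGen_eq (l : List String) (s : String) :
    pvStripExtA l s =
      match l.find? (fun e => PySem.Str.endswith (PySem.Str.lower s) e) with
      | some ext => PySem.Str.slice s none (some (-(PySem.Str.len ext : Int)))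
      | none => s := by
  induction l with
  | nil => rfl
  | cons e r ih =>
    rw [pvStripExtA, List.find?_cons]
    cases h : PySem.Str.endswith (PySem.Str.lower s) e with
    | false => rw [if_neg (by simp [h]), ih]
    | true => rw [if_pos (by simp [h])]

theorem stripExt_eq (s : String) : pvStripExtA pvExtsA s = pvStripExtB s :=
  stripGen_eq pvExtsA s

/-- A's loop body, named -/
def pvStepA (d : PySem.Dict String (Option String)) (part : String) :
    PySem.Dict String (Option String) :=
  if PySem.Str.isIn "-" part = false then d
  else
    match (PySem.Str.splitMax? part "-" 1).getD [] with
    | n :: v :: _ => if d.contains n && v != "" then d.insert n (some v) else d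
    | _ => d

/-- B's loop body, named -/
def pvStepB (acc : List (String × String)) (part : String) : List (String × String) :=
  if PySem.Str.isIn "-" part then
    match (PySem.Str.splitMax? part "-" 1).getD [] with
    | [] => acc
    | [_] => acc
    | n :: v :: _ => if v != "" then acc ++ [(n, v)] else acc
  else acc

/-- the conditional overwrite both loops reduce to -/
def pvStepD (d : PySem.Dict String (Option String)) (p : String × String) :
    PySem.Dict String (Option String) :=
  if d.contains p.1 then d.insert p.1 (some p.2) else d

/-- the pair a token contributes, shared shape of both loops -/
def pvPairOf (part : String) : Option (String × String) :=
  if PySem.Str.isIn "-" part then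
    match (PySem.Str.splitMax? part "-" 1).getD [] with
    | n :: v :: _ => if v != "" then some (n, v) else none
    | _ => none
  else none

/-- first-some choice (Python's "last assignment wins", read back to front) -/
def pvOver (o : Option String) (v : Option String) : Option String :=
  match o with
  | some w => some w
  | none => v

theorem pvOver_none (o : Option String) : pvOver o none = o := by
  cases o <;> rfl

/-- last assignment to key k among the pairs -/
def pvLast (P : List (String × String)) (k : String) : Option String :=
  (P.reverse.find? (fun p => p.1 == k)).map Prod.snd

theorem pvLast_cons (n v : String) (P : List (String × String)) (k : String) :
    pvLast ((n, v) :: P) k = pvOver (pvLast P k) (if k = n then some v else none) := by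
  unfold pvLast
  rw [List.reverse_cons, List.find?_append]
  cases h : (P.reverse.find? (fun p => p.1 == k)) with
  | none =>
    by_cases hk : k = n
    · subst hk; simp [List.find?, pvOver, Option.or]
    · have hb : (n == k) = false := by simp [Ne.symm hk]
      simp [List.find?, hb, pvOver, Option.or, hk]
  | some p => simp [pvOver, Option.or]

theorem stepA_eq_pairOf (d : PySem.Dict String (Option String)) (part : String) :
    pvStepA d part = match pvPairOf part with
                     | some p => pvStepD d p
                     | none => d := by
  unfold pvStepA pvPairOf pvStepD
  cases h : PySem.Str.isIn "-" part with
  | false => simp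
  | true =>
    cases hs : (PySem.Str.splitMax? part "-" 1).getD [] with
    | nil => simp
    | cons n t =>
      cases t with
      | nil => simp
      | cons v r =>
        by_cases hv : v = ""
        · simp [hv]
        · simp [hv]

theorem B_fold_filterMap (parts : List String) (acc : List (String × String)) :
    parts.foldl pvStepB acc = acc ++ parts.filterMap pvPairOf := by
  induction parts generalizing acc with
  | nil => simp
  | cons part rest ih =>
    rw [List.foldl_cons, List.filterMap_cons, ih]
    have hb : pvStepB acc part = acc ++ (pvPairOf part).toList := by
      unfold pvStepB pvPairOf
      cases h : PySem.Str.isIn "-" part with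
      | false => simp
      | true =>
        cases hs : (PySem.Str.splitMax? part "-" 1).getD [] with
        | nil => simp
        | cons n t =>
          cases t with
          | nil => simp
          | cons v r => by_cases hv : v = "" <;> simp [hv]
    rw [hb, List.append_assoc]
    cases hp : pvPairOf part <;> simp

theorem A_fold_filterMap (parts : List String) (d : PySem.Dict String (Option String)) :
    parts.foldl pvStepA d = (parts.filterMap pvPairOf).foldl pvStepD d := by
  induction parts generalizing d with
  | nil => rfl
  | cons part rest ih =>
    rw [List.foldl_cons, List.filterMap_cons, stepA_eq_pairOf, ih]
    cases hp : pvPairOf part <;> simp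

theorem core_items (P : List (String × String)) (d : PySem.Dict String (Option String)) :
    (P.foldl pvStepD d).items
      = d.items.map (fun e => (e.1, pvOver (pvLast P e.1) e.2)) := by
  induction P generalizing d with
  | nil =>
    simp only [List.foldl_nil]
    have : ∀ e : String × Option String, (e.1, pvOver (pvLast [] e.1) e.2) = e := by
      intro e; simp [pvLast, pvOver]
    rw [List.map_congr_left (fun e _ => this e), List.map_id']
  | cons p P ih =>
    obtain ⟨n, v⟩ := p
    rw [List.foldl_cons, ih]
    show _ = d.items.map _
    unfold pvStepD
    by_cases hc : d.contains n
    · simp only [hc, if_pos]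
      rw [PySem.Dict.items_insert_of_contains d (some v) hc, List.map_map]
      apply List.map_congr_left
      intro e _
      by_cases he : e.1 = n
      · have hb : (e.1 == n) = true := by simp [he]
        have hf : (if (e.1 == n) = true then (n, some v) else e) = (n, some v) := if_pos hb
        simp only [Function.comp_apply, hf]
        rw [pvLast_cons, he, if_pos rfl]
        cases pvLast P n <;> rfl
      · have hb : (e.1 == n) = false := by simp [he]
        have hf : (if (e.1 == n) = true then (n, some v) else e) = e := by rw [hb]; rfl
        simp only [Function.comp_apply, hf]
        rw [pvLast_cons, if_neg he]
        cases pvLast P e.1 <;> rfl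
    · simp only [hc, Bool.false_eq_true, if_false]
      apply List.map_congr_left
      intro e he
      have hne : e.1 ≠ n := by
        intro h
        exact hc (by
          rw [PySem.Dict.contains_iff_mem_keys]
          exact h ▸ PySem.Dict.mem_keys_of_mem_items d he)
      rw [pvLast_cons, if_neg hne]
      cases pvLast P e.1 <;> rfl

def pvDict0 : PySem.Dict String (Option String) := PySem.Dict.ofList
  [("sub", none), ("ses", none), ("task", none), ("acq", none), ("ce", none),
   ("rec", none), ("dir", none), ("run", none), ("mod", none), ("echo", none),
   ("flip", none), ("inv", none), ("mt", none), ("part", none), ("proc", none),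
   ("hemi", none), ("space", none), ("split", none), ("desc", none)]

def pvPartsA (filename : String) : List String :=
  (PySem.Str.split? (pvStripExtA pvExtsA filename) "_").getD []

def pvPartsB (filename : String) : List String :=
  (PySem.Str.split? (pvStripExtB filename) "_").getD []

theorem portA_items (filename : String) :
    extract_bids_entities filename = ((pvPartsA filename).foldl pvStepA pvDict0).items := rfl

theorem portB_map (filename : String) :
    extract_bids_entities_alt filename =
      pvKeysB.map (fun k => (k, pvLast ((pvPartsB filename).foldl pvStepB []) k)) := rfl

theorem parts_eq (filename : String) : pvPartsA filename = pvPartsB filename := by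
  unfold pvPartsA pvPartsB
  rw [stripExt_eq]

theorem dict0_items : pvDict0.items = pvKeysB.map (fun k => (k, (none : Option String))) := by
  rfl

-- ===== VERDICT (by name: the statement is the Claim_ definition above) =====
theorem extract_bids_entities_spec : Claim_equal_extract_bids_entities := by
  intro filename _
  show extract_bids_entities filename = extract_bids_entities_alt filename
  rw [portA_items, portB_map, parts_eq, A_fold_filterMap, core_items,
    B_fold_filterMap, List.nil_append, dict0_items, List.map_map]
  apply List.map_congr_left
  intro k _
  simp only [Function.comp, pvOver_none]
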